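-- pv_equiv track=rewrite | github.com/bittr-ai/tess-vetter | src/tess_vetter/validation/detrend_grid_defaults.py | expanded_detrender_count
-- ===== SOURCE A (Python) =====
-- DEFAULT_TRANSIT_MASKED_BIN_HOURS: tuple[float, ...] = (4.0, 6.0, 8.0)
--
-- DEFAULT_TRANSIT_MASKED_BUFFER_FACTORS: tuple[float, ...] = (1.5, 2.0, 3.0)
--
-- DEFAULT_TRANSIT_MASKED_SIGMA_CLIPS: tuple[float, ...] = (3.0, 5.0)
--
-- def expanded_detrender_count(detrenders: list[str]) -> int:
--     """Return expanded detrender count accounting for transit-masked sub-variants."""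
--     tm_count = (
--         len(DEFAULT_TRANSIT_MASKED_BIN_HOURS)
--         * len(DEFAULT_TRANSIT_MASKED_BUFFER_FACTORS)
--         * len(DEFAULT_TRANSIT_MASKED_SIGMA_CLIPS)
--     )
--     total = 0
--     for detrender in detrenders:
--         if str(detrender) == "transit_masked_bin_median":
--             total += tm_count
--         else:
--             total += 1
--     return int(total)
-- ===== SOURCE B (Python) =====
-- DEFAULT_TRANSIT_MASKED_BIN_HOURS: tuple[float, ...] = (4.0, 6.0, 8.0)
-- DEFAULT_TRANSIT_MASKED_BUFFER_FACTORS: tuple[float, ...] = (1.5, 2.0, 3.0)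
-- DEFAULT_TRANSIT_MASKED_SIGMA_CLIPS: tuple[float, ...] = (3.0, 5.0)
--
--
-- def _expand(detrender) -> list:
--     """All concrete variants a single detrender stands for."""
--     if str(detrender) == "transit_masked_bin_median":
--         return [
--             (detrender, h, f, s)
--             for h in DEFAULT_TRANSIT_MASKED_BIN_HOURS
--             for f in DEFAULT_TRANSIT_MASKED_BUFFER_FACTORS
--             for s in DEFAULT_TRANSIT_MASKED_SIGMA_CLIPS
--         ]
--     return [(detrender,)]
--
--
-- def expanded_detrender_count(detrenders: list[str]) -> int:
--     """Materialize the expanded variant list and measure it."""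
--     expanded = [variant for d in detrenders for variant in _expand(d)]
--     return len(expanded)
-- ===== Notes on version B (the rewrite author's own statement) =====
-- stated objective: alternative
-- what changed: Instead of accumulating an integer with a branch, B materializes the expanded variant list (one tuple per (bin_hours, buffer, sigma) sub-variant via nested comprehension over the three default tuples) and returns its length.
import Mathlib
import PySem

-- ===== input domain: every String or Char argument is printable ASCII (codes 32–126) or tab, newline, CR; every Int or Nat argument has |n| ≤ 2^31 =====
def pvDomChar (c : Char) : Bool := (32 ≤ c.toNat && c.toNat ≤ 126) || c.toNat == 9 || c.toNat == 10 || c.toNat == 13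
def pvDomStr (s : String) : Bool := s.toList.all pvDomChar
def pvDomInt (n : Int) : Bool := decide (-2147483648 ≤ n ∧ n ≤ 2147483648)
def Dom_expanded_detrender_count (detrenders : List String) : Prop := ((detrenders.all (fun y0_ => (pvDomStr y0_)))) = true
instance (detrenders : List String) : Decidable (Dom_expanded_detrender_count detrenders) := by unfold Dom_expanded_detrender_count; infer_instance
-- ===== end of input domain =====

-- B materializes the expanded variant list and returns its length instead of accumulating a count; objective: alternative.

-- ===== PORT A =====
def expanded_detrender_count (detrenders : List String) : Int :=
  let tm_count : Int := 3 * 3 * 2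
  detrenders.foldl (fun total detrender =>
    if detrender = "transit_masked_bin_median" then total + tm_count else total + 1) 0

-- ===== PORT B =====
-- The float constants are only iterated over, never inspected; they are rendered as string
-- literals here (exact for this program: only their count matters to every computation).
def pvBinHours : List String := ["4.0", "6.0", "8.0"]
def pvBufferFactors : List String := ["1.5", "2.0", "3.0"]
def pvSigmaClips : List String := ["3.0", "5.0"]

-- Python's heterogeneous tuples (d,) / (d, h, f, s) as one Lean type.
inductive PvVariant
  | single : String → PvVariant
  | tm : String → String → String → String → PvVariant
deriving DecidableEq, Repr

def pvExpand (detrender : String) : List PvVariant :=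
  if detrender = "transit_masked_bin_median" then
    pvBinHours.flatMap (fun h =>
      pvBufferFactors.flatMap (fun f =>
        pvSigmaClips.map (fun s => PvVariant.tm detrender h f s)))
  else [PvVariant.single detrender]

def expanded_detrender_count_alt (detrenders : List String) : Int :=
  let expanded := detrenders.flatMap pvExpand
  (expanded.length : Int)

-- ===== PRECONDITION & SPEC =====
def Spec_expanded_detrender_count (detrenders : List String) (out : Int) : Prop := out = expanded_detrender_count_alt detrenders
instance (detrenders : List String) (out : Int) : Decidable (Spec_expanded_detrender_count detrenders out) := by unfold Spec_expanded_detrender_count; infer_instance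

-- ===== CLAIM (what is proved, stated in full; the proofs are below) =====
def Claim_equal_expanded_detrender_count : Prop := ∀ (detrenders : List String), Dom_expanded_detrender_count detrenders → Spec_expanded_detrender_count detrenders (expanded_detrender_count detrenders)

-- ===== LEMMAS AND PROOFS =====
lemma pv_expand_length (d : String) :
    ((pvExpand d).length : Int) = if d = "transit_masked_bin_median" then 18 else 1 := by
  by_cases h : d = "transit_masked_bin_median" <;>
    simp [pvExpand, h, pvBinHours, pvBufferFactors, pvSigmaClips]

lemma pv_fold_eq_flat_length (l : List String) (t : Int) :
    l.foldl (fun total d => if d = "transit_masked_bin_median" then total + 18 else total + 1) t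
      = t + ((l.flatMap pvExpand).length : Int) := by
  induction l generalizing t with
  | nil => simp
  | cons x xs ih =>
    simp only [List.foldl_cons, List.flatMap_cons, List.length_append, ih]
    have hx := pv_expand_length x
    by_cases h : x = "transit_masked_bin_median" <;> simp [h] at hx ⊢ <;> omega

-- ===== VERDICT (by name: the statement is the Claim_ definition above) =====
theorem expanded_detrender_count_spec : Claim_equal_expanded_detrender_count := by
  intro l _
  unfold Spec_expanded_detrender_count expanded_detrender_count expanded_detrender_count_alt
  show List.foldl _ 0 l = _
  norm_num only
  rw [pv_fold_eq_flat_length]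
  ring
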